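-- pv_equiv track=rewrite | github.com/ofreshy/coderbyte | members/connect_four.py | ConnectFourWinner
-- ===== SOURCE A (Python) =====
-- from itertools import chain
--
-- class Board(object):
--     @classmethod
--     def from_str_arr(cls, strArr):
--         matrix = [row.strip('()').split(',') for row in strArr[1:]]
--         return cls(matrix)
--
--     def __init__(self, matrix):
--         self.mat = matrix
--         self.N = len(matrix)
--         self.M = len(matrix[0])
--
--     def get(self, i, j):
--         return self.mat[i][j]
--
--     def get_cells_below_me(self, i, j):
--         return [self.mat[x][j] for x in range(i+1, self.N)]
--
--     def get_horizontal_neighbours(self, i, j):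
--         sj = max(0, j-3)
--         ej = min(self.M, j+4) - 3
--         for k in range(sj, ej):
--             yield [self.mat[i][x] for x in range(k, k+4)]
--
--     def get_vertical_neighbours(self, i, j):
--         si = max(0, i-3)
--         ei = min(self.N, i+4) - 3
--         for k in range(si, ei):
--             yield [self.mat[x][j] for x in range(k, k+4)]
--
--     def get_diagonal_neighbours(self, i, j):
--         for k in range(-3, 1):
--             ilow, ihigh = i-k, i-k-3
--             jleft, jright = j+k, j+k+3
--             if ilow < self.N and ihigh >= 0 and jleft >= 0 and jright < self.M:
--                 yield [self.mat[i-x][j+x] for x in range(k, k+4)]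
--
--         for k in range(-3, 1):
--             ilow, ihigh = i-k, i-k-3
--             jright, jleft = j-k, j-k-3
--             if ilow < self.N and ihigh >= 0 and jleft >= 0 and jright < self.M:
--                 yield [self.mat[i-x][j-x] for x in range(k, k+4)]
--
--     def get_neighbours(self, i, j):
--         return chain(
--             self.get_horizontal_neighbours(i, j),
--             self.get_vertical_neighbours(i, j),
--             self.get_diagonal_neighbours(i, j),
--         )
--
--     def iter_indices(self):
--         for i in range(self.N-1, -1, -1):
--             for j in range(self.M-1, -1, -1):
--                 yield i, j
--
-- def ConnectFourWinner(strArr):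
--     color, board = strArr[0], Board.from_str_arr(strArr)
--
--     def cannot_slot(i, j):
--         for cell in board.get_cells_below_me(i, j):
--             if cell == 'x':
--                 return True
--         return False
--
--     def is_winning_slot(i, j):
--         if board.get(i, j) != 'x':
--             return False
--         if cannot_slot(i, j):
--             return False
--
--         for neighbour in board.get_neighbours(i, j):
--             if neighbour.count(color) == 3:
--                 return True
--         return False
--
--     for ii, jj in board.iter_indices():
--         if ii == 2 and jj == 3:
--             pass
--         if is_winning_slot(ii, jj):
--             return "(%sx%s)" % (ii+1, jj+1)
--     return "none"
-- ===== SOURCE B (Python) =====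
-- def ConnectFourWinner(strArr):
--     # Window-centric: enumerate every 4-in-a-line window of the board once,
--     # collect the slottable 'x' cells of windows holding exactly three stones of
--     # the color, and return the lexicographically largest such cell -- which is
--     # exactly A's bottom-up, right-to-left first hit (same value, window-centric route).
--     color = strArr[0]
--     mat = [row.strip('()').split(',') for row in strArr[1:]]
--     N, M = len(mat), len(mat[0])
--
--     # bottom-most 'x' row of each column (a cell is slottable iff it is this one)
--     slot = []
--     for j in range(M):
--         low = -1
--         for i in range(N):
--             if mat[i][j] == 'x':
--                 low = i
--         slot.append(low)
--
--     best = None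
--     for di, dj in ((0, 1), (1, 0), (-1, 1), (-1, -1)):
--         for r in range(N):
--             for c in range(M):
--                 cells = [(r + x * di, c + x * dj) for x in range(4)]
--                 if not all(0 <= a < N and 0 <= b < M for a, b in cells):
--                     continue
--                 if sum(1 for a, b in cells if mat[a][b] == color) != 3:
--                     continue
--                 for a, b in cells:
--                     if mat[a][b] == 'x' and slot[b] == a:
--                         if best is None or (a, b) > best:
--                             best = (a, b)
--     if best is None:
--         return "none"
--     return "(%sx%s)" % (best[0] + 1, best[1] + 1)
-- ===== Notes on version B (the rewrite author's own statement) =====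
-- stated objective: alternative
-- what changed: B is window-centric instead of cell-centric: it enumerates every 4-in-a-line window of the board once, collects the slottable 'x' cells of windows with exactly three stones of the color (slottability read from a per-column bottom-most-'x' table built in one pass), and returns the lexicographically largest candidate, instead of A's bottom-up find-first scan that, for every cell, rescans the column below it and generates all windows around it.
-- outside the precondition, e.g. on ConnectFourWinner(['R', 'R,R,R,R', 'o', 'R,R,R,x']): A returns '(3x4)', B raises IndexError
import Mathlib
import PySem

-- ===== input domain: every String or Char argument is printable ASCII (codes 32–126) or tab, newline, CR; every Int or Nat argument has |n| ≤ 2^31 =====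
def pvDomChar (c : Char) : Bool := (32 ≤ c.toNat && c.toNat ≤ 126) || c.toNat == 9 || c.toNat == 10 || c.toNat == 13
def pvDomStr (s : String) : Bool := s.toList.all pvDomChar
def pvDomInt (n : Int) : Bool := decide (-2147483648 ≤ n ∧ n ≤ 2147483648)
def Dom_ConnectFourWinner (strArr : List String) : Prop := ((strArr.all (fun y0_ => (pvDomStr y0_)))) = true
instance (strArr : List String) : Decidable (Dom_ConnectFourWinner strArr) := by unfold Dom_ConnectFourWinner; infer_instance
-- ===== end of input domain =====

-- ===== PORT A =====
-- B replaces A's cell-centric bottom-up find-first scan by one window-centric pass: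
-- every 4-in-a-line window is enumerated once, slottable 'x' cells of windows with
-- exactly three stones of the color are collected, and the lexicographically largest
-- candidate is returned (objective: alternative).

-- shared by both ports: the literal Python lines `strArr[0]`, `[row.strip('()').split(',') for row in strArr[1:]]`, `mat[i][j]`
def pvParse (strArr : List String) : List (List String) :=
  (PySem.List.slice strArr (some 1) none).map
    (fun row => (PySem.Str.split? (PySem.Str.stripChars row "()") ",").getD [])

def pvCell (mat : List (List String)) (r c : Int) : String :=
  PySem.List.pyGetD (PySem.List.pyGetD mat r []) c ""

def pvFmt (i j : Int) : String :=
  "(" ++ PySem.Int.toStr (i + 1) ++ "x" ++ PySem.Int.toStr (j + 1) ++ ")"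

-- A: get_cells_below_me / cannot_slot (early-return loop = any)
def pvCannotSlot (mat : List (List String)) (N i j : Int) : Bool :=
  (PySem.List.pyRange (i + 1) N 1).any (fun x => pvCell mat x j == "x")

-- A: get_horizontal_neighbours
def pvHoriz (mat : List (List String)) (M i j : Int) : List (List String) :=
  (PySem.List.pyRange (max 0 (j - 3)) (min M (j + 4) - 3) 1).map
    (fun k => (PySem.List.pyRange k (k + 4) 1).map (fun x => pvCell mat i x))

-- A: get_vertical_neighbours
def pvVert (mat : List (List String)) (N i j : Int) : List (List String) :=
  (PySem.List.pyRange (max 0 (i - 3)) (min N (i + 4) - 3) 1).map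
    (fun k => (PySem.List.pyRange k (k + 4) 1).map (fun x => pvCell mat x j))

-- A: get_diagonal_neighbours, first loop
def pvDiag1 (mat : List (List String)) (N M i j : Int) : List (List String) :=
  (PySem.List.pyRange (-3) 1 1).filterMap
    (fun k => if i - k < N ∧ 0 ≤ i - k - 3 ∧ 0 ≤ j + k ∧ j + k + 3 < M then
        some ((PySem.List.pyRange k (k + 4) 1).map (fun x => pvCell mat (i - x) (j + x)))
      else none)

-- A: get_diagonal_neighbours, second loop
def pvDiag2 (mat : List (List String)) (N M i j : Int) : List (List String) :=
  (PySem.List.pyRange (-3) 1 1).filterMap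
    (fun k => if i - k < N ∧ 0 ≤ i - k - 3 ∧ 0 ≤ j - k - 3 ∧ j - k < M then
        some ((PySem.List.pyRange k (k + 4) 1).map (fun x => pvCell mat (i - x) (j - x)))
      else none)

-- A: get_neighbours = chain(horizontal, vertical, diagonal)
def pvNeighbours (mat : List (List String)) (N M i j : Int) : List (List String) :=
  pvHoriz mat M i j ++ pvVert mat N i j ++ (pvDiag1 mat N M i j ++ pvDiag2 mat N M i j)

-- A: is_winning_slot (branches in source order; the neighbour loop with early return = any)
def pvIsWinningSlot (color : String) (mat : List (List String)) (N M i j : Int) : Bool :=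
  if pvCell mat i j != "x" then false
  else if pvCannotSlot mat N i j then false
  else (pvNeighbours mat N M i j).any (fun w => PySem.List.count w color == 3)

-- A: main loop over iter_indices (rows bottom-up, columns right-to-left; `if ii == 2 and jj == 3: pass` is a no-op)
def ConnectFourWinner (strArr : List String) : String :=
  let color := PySem.List.pyGetD strArr 0 ""
  let mat := pvParse strArr
  let N : Int := mat.length
  let M : Int := (PySem.List.pyGetD mat 0 []).length
  let idxs := (PySem.List.pyRange (N - 1) (-1) (-1)).flatMap
    (fun i => (PySem.List.pyRange (M - 1) (-1) (-1)).map (fun j => (i, j)))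
  match idxs.find? (fun p => pvIsWinningSlot color mat N M p.1 p.2) with
  | some p => pvFmt p.1 p.2
  | none => "none"

-- ===== PORT B =====
-- B: the per-column bottom-most-'x' table (inner `for i in range(N)` loop)
def pvLowestCol (mat : List (List String)) (N j : Int) : Int :=
  (PySem.List.pyRange 0 N 1).foldl (fun low i => if pvCell mat i j == "x" then i else low) (-1)

-- B: slot = the table for all columns
def pvLowest (mat : List (List String)) (N M : Int) : List Int :=
  (PySem.List.pyRange 0 M 1).map (fun j => pvLowestCol mat N j)

def pvDirs : List (Int × Int) := [(0, 1), (1, 0), (-1, 1), (-1, -1)]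

-- B: cells = [(r + x*di, c + x*dj) for x in range(4)]
def pvBCells (r c di dj : Int) : List (Int × Int) :=
  (PySem.List.pyRange 0 4 1).map (fun x => (r + x * di, c + x * dj))

def pvInb (N M : Int) (rc : Int × Int) : Bool :=
  decide (0 ≤ rc.1 ∧ rc.1 < N ∧ 0 ≤ rc.2 ∧ rc.2 < M)

-- B: one window's candidates — the two `continue` guards, then the inner cell loop's filter
def pvWinCands (color : String) (mat : List (List String)) (N M : Int) (lowest : List Int)
    (d : Int × Int) (r c : Int) : List (Int × Int) :=
  let cells := pvBCells r c d.1 d.2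
  if cells.all (pvInb N M) &&
     (cells.countP (fun rc => pvCell mat rc.1 rc.2 == color) == 3) then
    cells.filter (fun rc =>
      pvCell mat rc.1 rc.2 == "x" && PySem.List.pyGetD lowest rc.2 (-1) == rc.1)
  else []

-- B: all candidates, in the triple-loop order (direction, start row, start column)
def pvCands (color : String) (mat : List (List String)) (N M : Int) (lowest : List Int) :
    List (Int × Int) :=
  pvDirs.flatMap (fun d =>
    (PySem.List.pyRange 0 N 1).flatMap (fun r =>
      (PySem.List.pyRange 0 M 1).flatMap (fun c =>
        pvWinCands color mat N M lowest d r c)))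

-- B: `(a, b) > best` — Python's lexicographic tuple comparison
def pvLexLt (p q : Int × Int) : Bool :=
  decide (p.1 < q.1) || (p.1 == q.1 && decide (p.2 < q.2))

-- B: `if best is None or (a, b) > best: best = (a, b)`
def pvStep (b : Option (Int × Int)) (p : Int × Int) : Option (Int × Int) :=
  match b with
  | none => some p
  | some q => if pvLexLt q p then some p else some q

def ConnectFourWinner_alt (strArr : List String) : String :=
  let color := PySem.List.pyGetD strArr 0 ""
  let mat := pvParse strArr
  let N : Int := mat.length
  let M : Int := (PySem.List.pyGetD mat 0 []).length
  let lowest := pvLowest mat N M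
  match (pvCands color mat N M lowest).foldl pvStep none with
  | some p => pvFmt p.1 p.2
  | none => "none"

-- ===== PRECONDITION & SPEC =====
-- Pre_ excludes inputs where Python raises IndexError: fewer than two strings (no board row, so
-- matrix[0] fails), or a parsed row shorter than row 0 (out-of-range column access); on a few such
-- ragged boards A happens to return early before touching the short row while B's full window
-- enumeration reads every cell and raises — those are excluded too (see claim.json cites).
def Pre_ConnectFourWinner (strArr : List String) : Prop :=
  2 ≤ strArr.length ∧
  ∀ row ∈ pvParse strArr, ((pvParse strArr).headD []).length ≤ row.length
instance (strArr : List String) : Decidable (Pre_ConnectFourWinner strArr) := by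
  unfold Pre_ConnectFourWinner; infer_instance

def pvWitness_ConnectFourWinner : List String := ["R", "x,x,x,x", "R,R,R,x"]

def Spec_ConnectFourWinner (strArr : List String) (out : String) : Prop := out = ConnectFourWinner_alt strArr
instance (strArr : List String) (out : String) : Decidable (Spec_ConnectFourWinner strArr out) := by unfold Spec_ConnectFourWinner; infer_instance

-- ===== CLAIM (what is proved, stated in full; the proofs are below) =====
def Claim_equal_ConnectFourWinner : Prop := ∀ (strArr : List String), Dom_ConnectFourWinner strArr → Pre_ConnectFourWinner strArr → Spec_ConnectFourWinner strArr (ConnectFourWinner strArr)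

-- ===== LEMMAS AND PROOFS =====

-- A's window enumeration around a fixed cell, in B's direction-vector form (proof-side only)
def pvWindow (i j di dj t : Int) : List (Int × Int) :=
  (PySem.List.pyRange t (t + 4) 1).map (fun x => (i + x * di, j + x * dj))

def pvWins (color : String) (mat : List (List String)) (N M i j : Int) : Bool :=
  pvDirs.any (fun d =>
    (PySem.List.pyRange (-3) 1 1).any (fun t =>
      let cells := pvWindow i j d.1 d.2 t
      (cells.all fun rc => decide (0 ≤ rc.1 ∧ rc.1 < N ∧ 0 ≤ rc.2 ∧ rc.2 < M)) &&
      (cells.countP (fun rc => pvCell mat rc.1 rc.2 == color) == 3)))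

theorem pv_find?_congr {a : Type} (l : List a) (f g : a → Bool)
    (h : ∀ x ∈ l, f x = g x) : l.find? f = l.find? g := by
  induction l with
  | nil => rfl
  | cons a l ih =>
    simp only [List.find?_cons]
    rw [h a (by simp)]
    cases g a
    · exact ih (fun x hx => h x (by simp [hx]))
    · rfl

theorem pv_range4 (t : Int) : PySem.List.pyRange t (t + 4) 1 = [t, t + 1, t + 2, t + 3] := by
  rw [PySem.List.pyRange_one]
  norm_num [show ((4 : Int).toNat) = 4 from rfl, List.range_succ]

theorem pv_low_aux (g : Int → Bool) (n : Nat) : ∀ (i : Int), 0 ≤ i → i < (n:Int) → g i = true →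
    (((PySem.List.pyRange 0 (n:Int) 1).foldl (fun low x => if g x then x else low) (-1) = i)
     ↔ ∀ x : Int, i < x → x < (n:Int) → g x = false) := by
  induction n with
  | zero => intro i h0 hi hg; omega
  | succ n ih =>
    intro i h0 hi hg
    have hsplit : PySem.List.pyRange 0 ((n:Int)+1) 1 = PySem.List.pyRange 0 (n:Int) 1 ++ [(n:Int)] :=
      PySem.List.pyRange_one_succ_right (by omega)
    push_cast
    rw [hsplit, List.foldl_append]
    simp only [List.foldl_cons, List.foldl_nil]
    by_cases hgn : g (n:Int) = true
    · rw [if_pos hgn]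
      rcases eq_or_lt_of_le (show i ≤ (n:Int) by omega) with heq | hlt
      · subst heq
        constructor
        · intro _ x hx1 hx2; omega
        · intro _; rfl
      · constructor
        · intro h; omega
        · intro h; exact absurd hgn (by simp [h (n:Int) hlt (by omega)])
    · rw [if_neg hgn]
      rcases eq_or_lt_of_le (show i ≤ (n:Int) by omega) with heq | hlt
      · subst heq; exact absurd hg hgn
      · rw [ih i h0 (by omega) hg]
        constructor
        · intro h x hx1 hx2
          rcases eq_or_lt_of_le (show x ≤ (n:Int) by omega) with hxe | hxl
          · subst hxe; simpa using hgn
          · exact h x hx1 hxl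
        · intro h x hx1 hx2; exact h x hx1 (by omega)

theorem pv_low_spec (mat : List (List String)) (N i j : Int)
    (h0 : 0 ≤ i) (hi : i < N) (hx : pvCell mat i j == "x") :
    (pvLowestCol mat N j == i) = ! pvCannotSlot mat N i j := by
  obtain ⟨n, rfl⟩ : ∃ n : Nat, N = (n:Int) := ⟨N.toNat, by omega⟩
  rw [Bool.eq_iff_iff]
  unfold pvLowestCol pvCannotSlot
  rw [beq_iff_eq]
  rw [pv_low_aux (fun x => pvCell mat x j == "x") n i h0 hi hx]
  simp only [Bool.not_eq_true', List.any_eq_false, PySem.List.mem_pyRange_one]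
  constructor
  · intro h x hx'; simpa using h x (by omega) (by omega)
  · intro h x hx1 hx2; simpa using h x ⟨by omega, by omega⟩

theorem pv_horiz_eq (color : String) (mat : List (List String)) (N M i j : Int)
    (hi0 : 0 ≤ i) (hiN : i < N) (hj0 : 0 ≤ j) (hjM : j < M) :
    (pvHoriz mat M i j).any (fun w => PySem.List.count w color == 3)
    = (PySem.List.pyRange (-3) 1 1).any (fun t =>
        ((pvWindow i j 0 1 t).all fun rc => decide (0 ≤ rc.1 ∧ rc.1 < N ∧ 0 ≤ rc.2 ∧ rc.2 < M)) &&
        ((pvWindow i j 0 1 t).countP (fun rc => pvCell mat rc.1 rc.2 == color) == 3)) := by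
  rw [Bool.eq_iff_iff]
  unfold pvHoriz pvWindow
  rw [List.any_map]
  simp only [List.any_eq_true, PySem.List.mem_pyRange_one, Function.comp, pv_range4,
    List.map_cons, List.map_nil, List.all_cons, List.all_nil, List.countP_cons, List.countP_nil,
    PySem.List.count, List.count_cons, List.count_nil, Bool.and_eq_true]
  constructor
  · rintro ⟨k, ⟨hk1, hk2⟩, hcnt⟩
    refine ⟨k - j, ⟨by omega, by omega⟩, ?_, ?_⟩
    · simp only [decide_eq_true_eq, and_true]
      omega
    · simp only [mul_zero, add_zero, mul_one,
        show j + (k - j) = k from by ring, show j + (k - j + 1) = k + 1 from by ring,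
        show j + (k - j + 2) = k + 2 from by ring, show j + (k - j + 3) = k + 3 from by ring]
      exact hcnt
  · rintro ⟨t, ⟨ht1, ht2⟩, hb, hcnt⟩
    simp only [decide_eq_true_eq, and_true, mul_zero, add_zero, mul_one] at hb
    refine ⟨j + t, ⟨by omega, by omega⟩, ?_⟩
    simp only [mul_zero, add_zero, mul_one,
      show j + (t + 1) = j + t + 1 from by ring, show j + (t + 2) = j + t + 2 from by ring,
      show j + (t + 3) = j + t + 3 from by ring] at hcnt
    exact hcnt

theorem pv_vert_eq (color : String) (mat : List (List String)) (N M i j : Int)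
    (hi0 : 0 ≤ i) (hiN : i < N) (hj0 : 0 ≤ j) (hjM : j < M) :
    (pvVert mat N i j).any (fun w => PySem.List.count w color == 3)
    = (PySem.List.pyRange (-3) 1 1).any (fun t =>
        ((pvWindow i j 1 0 t).all fun rc => decide (0 ≤ rc.1 ∧ rc.1 < N ∧ 0 ≤ rc.2 ∧ rc.2 < M)) &&
        ((pvWindow i j 1 0 t).countP (fun rc => pvCell mat rc.1 rc.2 == color) == 3)) := by
  rw [Bool.eq_iff_iff]
  unfold pvVert pvWindow
  rw [List.any_map]
  simp only [List.any_eq_true, PySem.List.mem_pyRange_one, Function.comp, pv_range4,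
    List.map_cons, List.map_nil, List.all_cons, List.all_nil, List.countP_cons, List.countP_nil,
    PySem.List.count, List.count_cons, List.count_nil, Bool.and_eq_true]
  constructor
  · rintro ⟨k, ⟨hk1, hk2⟩, hcnt⟩
    refine ⟨k - i, ⟨by omega, by omega⟩, ?_, ?_⟩
    · simp only [decide_eq_true_eq, and_true]
      omega
    · simp only [mul_zero, add_zero, mul_one,
        show i + (k - i) = k from by ring, show i + (k - i + 1) = k + 1 from by ring,
        show i + (k - i + 2) = k + 2 from by ring, show i + (k - i + 3) = k + 3 from by ring]
      exact hcnt
  · rintro ⟨t, ⟨ht1, ht2⟩, hb, hcnt⟩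
    simp only [decide_eq_true_eq, and_true, mul_zero, add_zero, mul_one] at hb
    refine ⟨i + t, ⟨by omega, by omega⟩, ?_⟩
    simp only [mul_zero, add_zero, mul_one,
      show i + (t + 1) = i + t + 1 from by ring, show i + (t + 2) = i + t + 2 from by ring,
      show i + (t + 3) = i + t + 3 from by ring] at hcnt
    exact hcnt

theorem pv_diag1_eq (color : String) (mat : List (List String)) (N M i j : Int) :
    (pvDiag1 mat N M i j).any (fun w => PySem.List.count w color == 3)
    = (PySem.List.pyRange (-3) 1 1).any (fun t =>
        ((pvWindow i j (-1) 1 t).all fun rc => decide (0 ≤ rc.1 ∧ rc.1 < N ∧ 0 ≤ rc.2 ∧ rc.2 < M)) &&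
        ((pvWindow i j (-1) 1 t).countP (fun rc => pvCell mat rc.1 rc.2 == color) == 3)) := by
  rw [Bool.eq_iff_iff]
  unfold pvDiag1 pvWindow
  rw [List.any_filterMap]
  simp only [List.any_eq_true, PySem.List.mem_pyRange_one, pv_range4,
    List.map_cons, List.map_nil, List.all_cons, List.all_nil, List.countP_cons, List.countP_nil,
    PySem.List.count, Bool.and_eq_true]
  constructor
  · rintro ⟨k, ⟨hk1, hk2⟩, hm⟩
    by_cases hg : i - k < N ∧ 0 ≤ i - k - 3 ∧ 0 ≤ j + k ∧ j + k + 3 < M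
    · rw [if_pos hg] at hm
      refine ⟨k, ⟨hk1, hk2⟩, ?_, ?_⟩
      · simp only [decide_eq_true_eq, and_true]
        omega
      · simp only [List.count_cons, List.count_nil] at hm
        simp only [mul_one, mul_neg_one, ← sub_eq_add_neg]
        exact hm
    · rw [if_neg hg] at hm
      exact absurd hm (by simp)
  · rintro ⟨t, ⟨ht1, ht2⟩, hb, hcnt⟩
    simp only [decide_eq_true_eq, and_true, mul_one, mul_neg_one, ← sub_eq_add_neg] at hb hcnt
    refine ⟨t, ⟨ht1, ht2⟩, ?_⟩
    rw [if_pos (by omega)]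
    simp only [List.count_cons, List.count_nil]
    exact hcnt

theorem pv_diag2_eq (color : String) (mat : List (List String)) (N M i j : Int) :
    (pvDiag2 mat N M i j).any (fun w => PySem.List.count w color == 3)
    = (PySem.List.pyRange (-3) 1 1).any (fun t =>
        ((pvWindow i j (-1) (-1) t).all fun rc => decide (0 ≤ rc.1 ∧ rc.1 < N ∧ 0 ≤ rc.2 ∧ rc.2 < M)) &&
        ((pvWindow i j (-1) (-1) t).countP (fun rc => pvCell mat rc.1 rc.2 == color) == 3)) := by
  rw [Bool.eq_iff_iff]
  unfold pvDiag2 pvWindow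
  rw [List.any_filterMap]
  simp only [List.any_eq_true, PySem.List.mem_pyRange_one, pv_range4,
    List.map_cons, List.map_nil, List.all_cons, List.all_nil, List.countP_cons, List.countP_nil,
    PySem.List.count, Bool.and_eq_true]
  constructor
  · rintro ⟨k, ⟨hk1, hk2⟩, hm⟩
    by_cases hg : i - k < N ∧ 0 ≤ i - k - 3 ∧ 0 ≤ j - k - 3 ∧ j - k < M
    · rw [if_pos hg] at hm
      refine ⟨k, ⟨hk1, hk2⟩, ?_, ?_⟩
      · simp only [decide_eq_true_eq, and_true]
        omega
      · simp only [List.count_cons, List.count_nil] at hm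
        simp only [mul_neg_one, ← sub_eq_add_neg]
        exact hm
    · rw [if_neg hg] at hm
      exact absurd hm (by simp)
  · rintro ⟨t, ⟨ht1, ht2⟩, hb, hcnt⟩
    simp only [decide_eq_true_eq, and_true, mul_neg_one, ← sub_eq_add_neg] at hb hcnt
    refine ⟨t, ⟨ht1, ht2⟩, ?_⟩
    rw [if_pos (by omega)]
    simp only [List.count_cons, List.count_nil]
    exact hcnt

theorem pv_windows_eq (color : String) (mat : List (List String)) (N M i j : Int)
    (hi0 : 0 ≤ i) (hiN : i < N) (hj0 : 0 ≤ j) (hjM : j < M) :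
    ((pvNeighbours mat N M i j).any (fun w => PySem.List.count w color == 3))
      = pvWins color mat N M i j := by
  unfold pvNeighbours pvWins pvDirs
  simp only [List.any_append, List.any_cons, List.any_nil]
  rw [pv_horiz_eq color mat N M i j hi0 hiN hj0 hjM,
      pv_vert_eq color mat N M i j hi0 hiN hj0 hjM,
      pv_diag1_eq color mat N M i j,
      pv_diag2_eq color mat N M i j]
  simp [Bool.or_assoc]

theorem pv_pred_eq (color : String) (mat : List (List String)) (N M i j : Int)
    (hi0 : 0 ≤ i) (hiN : i < N) (hj0 : 0 ≤ j) (hjM : j < M) :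
    pvIsWinningSlot color mat N M i j
    = (pvCell mat i j == "x" && (PySem.List.pyGetD (pvLowest mat N M) j (-1) == i) &&
       pvWins color mat N M i j) := by
  unfold pvIsWinningSlot
  by_cases hx : pvCell mat i j == "x"
  · have hget : PySem.List.pyGetD (pvLowest mat N M) j (-1) = pvLowestCol mat N j := by
      unfold pvLowest
      exact PySem.List.pyGetD_map_pyRange_of_nonneg _ M j (-1) hj0 hjM
    rw [hget, pv_low_spec mat N i j hi0 hiN hx, ← pv_windows_eq color mat N M i j hi0 hiN hj0 hjM]
    simp only [bne, hx, Bool.not_true, Bool.false_eq_true, if_false, Bool.true_and]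
    cases hc : pvCannotSlot mat N i j <;> simp
  · simp only [bne, hx, Bool.not_false, if_true, Bool.false_and]

-- ---- B's candidate list: membership characterization ----

theorem pv_bcells_window (i j di dj t : Int) :
    pvBCells (i + t * di) (j + t * dj) di dj = pvWindow i j di dj t := by
  unfold pvBCells pvWindow
  rw [pv_range4, show PySem.List.pyRange 0 4 1 = [0, 1, 2, 3] from by decide]
  simp only [List.map_cons, List.map_nil, List.cons.injEq, Prod.mk.injEq, and_true]
  and_intros <;> ring

theorem pv_mem_window (i j di dj t : Int) (ht1 : -3 ≤ t) (ht2 : t ≤ 0) :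
    (i, j) ∈ pvWindow i j di dj t := by
  unfold pvWindow
  rw [List.mem_map]
  exact ⟨0, by rw [PySem.List.mem_pyRange_one]; omega, by simp⟩

theorem pv_mem_wincands (color : String) (mat : List (List String)) (N M : Int)
    (lowest : List Int) (d : Int × Int) (r c i j : Int) :
    (i, j) ∈ pvWinCands color mat N M lowest d r c ↔
      ((pvBCells r c d.1 d.2).all (pvInb N M) = true ∧
       ((pvBCells r c d.1 d.2).countP (fun rc => pvCell mat rc.1 rc.2 == color) == 3) = true ∧
       (i, j) ∈ pvBCells r c d.1 d.2 ∧
       (pvCell mat i j == "x") = true ∧ (PySem.List.pyGetD lowest j (-1) == i) = true) := by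
  unfold pvWinCands
  by_cases h : ((pvBCells r c d.1 d.2).all (pvInb N M) &&
      ((pvBCells r c d.1 d.2).countP (fun rc => pvCell mat rc.1 rc.2 == color) == 3)) = true
  · rw [if_pos h]
    rw [Bool.and_eq_true] at h
    rw [List.mem_filter]
    simp only [h.1, h.2, true_and, Bool.and_eq_true]
  · rw [if_neg h]
    rw [Bool.and_eq_true] at h
    simp only [List.not_mem_nil, false_iff]
    tauto

theorem pv_mem_cands (color : String) (mat : List (List String)) (N M : Int)
    (lowest : List Int) (p : Int × Int) :
    p ∈ pvCands color mat N M lowest ↔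
      ((0 ≤ p.1 ∧ p.1 < N ∧ 0 ≤ p.2 ∧ p.2 < M) ∧
       (pvCell mat p.1 p.2 == "x" && PySem.List.pyGetD lowest p.2 (-1) == p.1 &&
        pvWins color mat N M p.1 p.2) = true) := by
  obtain ⟨i, j⟩ := p
  unfold pvCands
  simp only [List.mem_flatMap, PySem.List.mem_pyRange_one]
  constructor
  · rintro ⟨d, hd, r, ⟨hr0, hrN⟩, c, ⟨hc0, hcM⟩, hm⟩
    rw [pv_mem_wincands] at hm
    obtain ⟨hall, hcnt, hmem, hx, hlow⟩ := hm
    unfold pvBCells at hmem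
    rw [List.mem_map] at hmem
    obtain ⟨x, hxmem, hij⟩ := hmem
    rw [PySem.List.mem_pyRange_one] at hxmem
    have hij1 : i = r + x * d.1 := (congrArg Prod.fst hij).symm
    have hij2 : j = c + x * d.2 := (congrArg Prod.snd hij).symm
    have hbw : pvBCells r c d.1 d.2 = pvWindow i j d.1 d.2 (-x) := by
      have h1 : r = i + (-x) * d.1 := by rw [neg_mul]; linarith
      have h2 : c = j + (-x) * d.2 := by rw [neg_mul]; linarith
      rw [h1, h2, pv_bcells_window]
    have hmemw : (i, j) ∈ pvBCells r c d.1 d.2 := by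
      rw [hbw]; exact pv_mem_window i j d.1 d.2 (-x) (by omega) (by omega)
    have hin : pvInb N M (i, j) = true := List.all_eq_true.mp hall _ hmemw
    unfold pvInb at hin
    rw [decide_eq_true_eq] at hin
    refine ⟨hin, ?_⟩
    simp only [Bool.and_eq_true]
    refine ⟨⟨hx, hlow⟩, ?_⟩
    unfold pvWins
    simp only [List.any_eq_true, PySem.List.mem_pyRange_one, Bool.and_eq_true]
    refine ⟨d, hd, -x, ⟨by omega, by omega⟩, ?_, ?_⟩
    · rw [← hbw]
      exact hall
    · rw [← hbw]
      exact hcnt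
  · rintro ⟨⟨hi0, hiN, hj0, hjM⟩, hpred⟩
    simp only [Bool.and_eq_true] at hpred
    obtain ⟨⟨hx, hlow⟩, hwins⟩ := hpred
    unfold pvWins at hwins
    simp only [List.any_eq_true, PySem.List.mem_pyRange_one, Bool.and_eq_true] at hwins
    obtain ⟨d, hd, t, ⟨ht1, ht2⟩, hall, hcnt⟩ := hwins
    have hbw : pvBCells (i + t * d.1) (j + t * d.2) d.1 d.2 = pvWindow i j d.1 d.2 t :=
      pv_bcells_window i j d.1 d.2 t
    have hmemw : (i, j) ∈ pvBCells (i + t * d.1) (j + t * d.2) d.1 d.2 := by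
      rw [hbw]; exact pv_mem_window i j d.1 d.2 t ht1 (by omega)
    have hstart : (i + t * d.1, j + t * d.2) ∈ pvBCells (i + t * d.1) (j + t * d.2) d.1 d.2 := by
      unfold pvBCells
      rw [List.mem_map]
      exact ⟨0, by rw [PySem.List.mem_pyRange_one]; omega, by simp⟩
    have hall' : (pvBCells (i + t * d.1) (j + t * d.2) d.1 d.2).all (pvInb N M) = true := by
      rw [hbw]; exact hall
    have hinb : pvInb N M (i + t * d.1, j + t * d.2) = true :=
      List.all_eq_true.mp hall' _ hstart
    unfold pvInb at hinb
    rw [decide_eq_true_eq] at hinb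
    refine ⟨d, hd, i + t * d.1, ⟨by exact hinb.1, by exact hinb.2.1⟩,
            j + t * d.2, ⟨by exact hinb.2.2.1, by exact hinb.2.2.2⟩, ?_⟩
    rw [pv_mem_wincands]
    exact ⟨hall', by rw [hbw]; exact hcnt, hmemw, hx, hlow⟩

-- ---- the lex-max fold ----

theorem pv_lexlt_iff (a b : Int × Int) :
    pvLexLt a b = true ↔ (a.1 < b.1 ∨ (a.1 = b.1 ∧ a.2 < b.2)) := by
  simp [pvLexLt]

theorem pv_lexlt_false_iff (a b : Int × Int) :
    pvLexLt a b = false ↔ ¬(a.1 < b.1 ∨ (a.1 = b.1 ∧ a.2 < b.2)) := by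
  rw [← pv_lexlt_iff, Bool.not_eq_true]

theorem pv_lexlt_asym {a b : Int × Int} (h : pvLexLt a b = true) : pvLexLt b a = false := by
  rw [pv_lexlt_iff] at h
  rw [pv_lexlt_false_iff]
  omega

theorem pv_lexlt_total {a b : Int × Int} (h1 : pvLexLt a b = false) (h2 : pvLexLt b a = false) :
    a = b := by
  rw [pv_lexlt_false_iff] at h1 h2
  obtain ⟨x, y⟩ := a; obtain ⟨u, v⟩ := b
  simp only [Prod.mk.injEq]
  constructor <;> omega

theorem pv_lexlt_chain {a q r : Int × Int} (h1 : pvLexLt a q = false) (h2 : pvLexLt r a = false) :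
    pvLexLt r q = false := by
  rw [pv_lexlt_false_iff] at *
  omega

theorem pv_lexlt_chain' {a q r : Int × Int} (h1 : pvLexLt a q = true) (h2 : pvLexLt r q = false) :
    pvLexLt r a = false := by
  rw [pv_lexlt_iff] at h1
  rw [pv_lexlt_false_iff] at *
  omega

theorem pv_fold_acc (l : List (Int × Int)) : ∀ (a r : Int × Int),
    l.foldl pvStep (some a) = some r →
    (r = a ∨ r ∈ l) ∧ pvLexLt r a = false ∧ ∀ q ∈ l, pvLexLt r q = false := by
  induction l with
  | nil =>
    intro a r h
    simp only [List.foldl_nil, Option.some.injEq] at h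
    subst h
    refine ⟨Or.inl rfl, ?_, by simp⟩
    simp [pvLexLt]
  | cons q t ih =>
    intro a r h
    simp only [List.foldl_cons, pvStep] at h
    by_cases hlt : pvLexLt a q = true
    · rw [if_pos hlt] at h
      obtain ⟨hmem, hra, hall⟩ := ih q r h
      refine ⟨?_, pv_lexlt_chain' hlt hra, ?_⟩
      · rcases hmem with h' | h' <;> simp [h']
      · intro q' hq'
        rw [List.mem_cons] at hq'
        rcases hq' with rfl | hq'
        · exact hra
        · exact hall q' hq'
    · rw [if_neg hlt] at h
      rw [Bool.not_eq_true] at hlt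
      obtain ⟨hmem, hra, hall⟩ := ih a r h
      refine ⟨?_, hra, ?_⟩
      · rcases hmem with h' | h' <;> simp [h']
      · intro q' hq'
        rw [List.mem_cons] at hq'
        rcases hq' with rfl | hq'
        · exact pv_lexlt_chain hlt hra
        · exact hall q' hq'

theorem pv_fold_isSome (l : List (Int × Int)) : ∀ a, ∃ r, l.foldl pvStep (some a) = some r := by
  induction l with
  | nil => intro a; exact ⟨a, rfl⟩
  | cons q t ih =>
    intro a
    simp only [List.foldl_cons, pvStep]
    by_cases h : pvLexLt a q = true
    · rw [if_pos h]; exact ih q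
    · rw [if_neg h]; exact ih a

theorem pv_fold_eq_some (l : List (Int × Int)) (r : Int × Int)
    (hmem : r ∈ l) (hmax : ∀ q ∈ l, pvLexLt r q = false) :
    l.foldl pvStep none = some r := by
  cases l with
  | nil => simp at hmem
  | cons q t =>
    simp only [List.foldl_cons, pvStep]
    obtain ⟨r', hr'⟩ := pv_fold_isSome t q
    rw [hr']
    obtain ⟨hmem', hra', hall'⟩ := pv_fold_acc t q r' hr'
    have hr'l : r' ∈ q :: t := by rcases hmem' with h | h <;> simp [h]
    have hall'' : ∀ q' ∈ q :: t, pvLexLt r' q' = false := by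
      intro q' hq'
      rw [List.mem_cons] at hq'
      rcases hq' with rfl | hq'
      · exact hra'
      · exact hall' q' hq'
    exact congrArg some (pv_lexlt_total (hall'' r hmem) (hmax r' hr'l))

-- ---- find? on a strictly descending list is the lex-max satisfier ----

theorem pv_find_desc (l : List (Int × Int)) (f : Int × Int → Bool)
    (hp : l.Pairwise (fun a b => pvLexLt b a = true)) (r : Int × Int)
    (h : l.find? f = some r) :
    r ∈ l ∧ f r = true ∧ ∀ q ∈ l, f q = true → pvLexLt r q = false := by
  induction l with
  | nil => simp at h
  | cons a t ih =>
    rw [List.pairwise_cons] at hp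
    obtain ⟨ha, ht⟩ := hp
    by_cases hfa : f a = true
    · rw [List.find?_cons_of_pos hfa] at h
      obtain rfl : a = r := by simpa using h
      refine ⟨by simp, hfa, ?_⟩
      intro q hq _
      rw [List.mem_cons] at hq
      rcases hq with rfl | hq
      · rw [pv_lexlt_false_iff]; omega
      · exact pv_lexlt_asym (ha q hq)
    · rw [List.find?_cons_of_neg (by simpa using hfa)] at h
      obtain ⟨hmem, hfr, hall⟩ := ih ht h
      refine ⟨by simp [hmem], hfr, ?_⟩
      intro q hq hfq
      rw [List.mem_cons] at hq
      rcases hq with rfl | hq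
      · exact absurd hfq (by simp [hfa])
      · exact hall q hq hfq

-- ---- idxs: membership and sortedness ----

theorem pv_mem_idxs (N M : Int) (p : Int × Int) :
    p ∈ (PySem.List.pyRange (N - 1) (-1) (-1)).flatMap
      (fun i => (PySem.List.pyRange (M - 1) (-1) (-1)).map (fun j => (i, j))) ↔
    (0 ≤ p.1 ∧ p.1 < N ∧ 0 ≤ p.2 ∧ p.2 < M) := by
  obtain ⟨i, j⟩ := p
  simp only [List.mem_flatMap, List.mem_map, PySem.List.mem_pyRange_neg_one, Prod.mk.injEq]
  constructor
  · rintro ⟨a, ⟨h1, h2⟩, b, ⟨h3, h4⟩, rfl, rfl⟩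
    omega
  · rintro ⟨h1, h2, h3, h4⟩
    exact ⟨i, ⟨by omega, by omega⟩, j, ⟨by omega, by omega⟩, rfl, rfl⟩

theorem pv_desc (a b : Int) : (PySem.List.pyRange a b (-1)).Pairwise (· > ·) := by
  rw [PySem.List.pyRange_neg_one_eq_reverse, List.pairwise_reverse]
  exact PySem.List.pairwise_lt_pyRange_one (b + 1) (a + 1)

theorem pv_idxs_sorted (N M : Int) :
    ((PySem.List.pyRange (N - 1) (-1) (-1)).flatMap
      (fun i => (PySem.List.pyRange (M - 1) (-1) (-1)).map (fun j => (i, j)))).Pairwise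
      (fun a b => pvLexLt b a = true) := by
  rw [List.flatMap_def, List.pairwise_flatten]
  constructor
  · intro l' hl'
    rw [List.mem_map] at hl'
    obtain ⟨i, _, rfl⟩ := hl'
    rw [List.pairwise_map]
    refine (pv_desc (M - 1) (-1)).imp ?_
    intro j j' h
    simp only [pvLexLt, beq_self_eq_true, Bool.true_and, Bool.or_eq_true, decide_eq_true_eq]
    omega
  · rw [List.pairwise_map]
    refine (pv_desc (N - 1) (-1)).imp ?_
    intro i i' h x hx y hy
    rw [List.mem_map] at hx hy
    obtain ⟨j, _, rfl⟩ := hx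
    obtain ⟨j', _, rfl⟩ := hy
    simp only [pvLexLt, Bool.or_eq_true, decide_eq_true_eq]
    omega

-- ===== VERDICT (by name: the statement is the Claim_ definition above) =====
theorem ConnectFourWinner_spec : Claim_equal_ConnectFourWinner := by
  intro strArr _ hpre
  unfold Spec_ConnectFourWinner ConnectFourWinner ConnectFourWinner_alt
  simp only []
  set color := PySem.List.pyGetD strArr 0 "" with hcolor
  set mat := pvParse strArr with hmat
  set N : Int := (mat.length : Int) with hN
  set M : Int := ((PySem.List.pyGetD mat 0 []).length : Int) with hM
  set lowest := pvLowest mat N M with hlowest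
  set idxs := (PySem.List.pyRange (N - 1) (-1) (-1)).flatMap
    (fun i => (PySem.List.pyRange (M - 1) (-1) (-1)).map (fun j => (i, j))) with hidxs
  have hfind : idxs.find? (fun p => pvIsWinningSlot color mat N M p.1 p.2)
      = idxs.find? (fun p => pvCell mat p.1 p.2 == "x" &&
          (PySem.List.pyGetD lowest p.2 (-1) == p.1) && pvWins color mat N M p.1 p.2) := by
    apply pv_find?_congr
    intro p hp
    rw [hidxs, pv_mem_idxs] at hp
    exact pv_pred_eq color mat N M p.1 p.2 hp.1 (by omega) hp.2.2.1 (by omega)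
  rw [hfind]
  set f : Int × Int → Bool := fun p => pvCell mat p.1 p.2 == "x" &&
      (PySem.List.pyGetD lowest p.2 (-1) == p.1) && pvWins color mat N M p.1 p.2 with hf
  have hfold : (pvCands color mat N M lowest).foldl pvStep none = idxs.find? f := by
    cases hcase : idxs.find? f with
    | some r =>
      obtain ⟨hrmem, hfr, hmax⟩ := pv_find_desc idxs f (pv_idxs_sorted N M) r hcase
      apply pv_fold_eq_some
      · rw [pv_mem_cands]
        exact ⟨(pv_mem_idxs N M r).mp hrmem, hfr⟩
      · intro q hq
        rw [pv_mem_cands] at hq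
        exact hmax q ((pv_mem_idxs N M q).mpr hq.1) hq.2
    | none =>
      have hempty : pvCands color mat N M lowest = [] := by
        rw [List.eq_nil_iff_forall_not_mem]
        intro q hq
        rw [pv_mem_cands] at hq
        have := List.find?_eq_none.mp hcase q ((pv_mem_idxs N M q).mpr hq.1)
        exact this hq.2
      rw [hempty]
      rfl
  rw [hfold]
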